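-- pv_equiv track=rewrite | github.com/JKHira/sdsl2_coder | scripts/context_pack_bundle_doc_check.py | _strip_quoted
-- ===== SOURCE A (Python) =====
-- def _strip_quoted(text: str) -> str:
--     out: list[str] = []
--     escaped = False
--     in_string: str | None = None
--     for ch in text:
--         if escaped:
--             escaped = False
--             if in_string is None:
--                 out.append(ch)
--             continue
--         if ch == "\\":
--             escaped = True
--             if in_string is None:
--                 out.append(ch)
--             continue
--         if ch in {'"', "'"}:
--             if in_string is None:
--                 in_string = ch
--             elif in_string == ch:
--                 in_string = None
--             continue
--         if in_string is None:
--             out.append(ch)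
--     return "".join(out)
-- ===== SOURCE B (Python) =====
-- def _strip_quoted(text: str) -> str:
--     out: list[str] = []
--     i = 0
--     n = len(text)
--     while i < n:
--         ch = text[i]
--         if ch == "\\":
--             out.append(ch)
--             if i + 1 < n:
--                 out.append(text[i + 1])
--             i += 2
--         elif ch in ('"', "'"):
--             q = ch
--             i += 1
--             while i < n:
--                 if text[i] == "\\":
--                     i += 2
--                 elif text[i] == q:
--                     i += 1
--                     break
--                 else:
--                     i += 1
--         else:
--             out.append(ch)
--             i += 1
--     return "".join(out)
-- ===== Notes on version B (the rewrite author's own statement) =====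
-- stated objective: alternative
-- what changed: Replaces A's single pass with persistent escaped/in_string flags by an index scan whose inner while-loop consumes each quoted region at once, so no cross-iteration state survives.
import Mathlib
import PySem

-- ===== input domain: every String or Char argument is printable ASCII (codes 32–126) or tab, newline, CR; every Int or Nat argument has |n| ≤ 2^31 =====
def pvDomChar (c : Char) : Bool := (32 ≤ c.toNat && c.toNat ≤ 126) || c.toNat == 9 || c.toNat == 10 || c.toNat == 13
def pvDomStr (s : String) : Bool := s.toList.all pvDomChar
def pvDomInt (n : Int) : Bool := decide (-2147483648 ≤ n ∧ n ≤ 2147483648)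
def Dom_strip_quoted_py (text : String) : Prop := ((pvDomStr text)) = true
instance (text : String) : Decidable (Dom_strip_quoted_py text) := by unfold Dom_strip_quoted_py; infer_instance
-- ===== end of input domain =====

-- B replaces A's cross-iteration `escaped`/`in_string` flags with an index scan whose inner
-- loop consumes each quoted region at once (objective: alternative decomposition; same cost).

-- ===== PORT A =====
-- one iteration of A's for-loop: state = (out, escaped, in_string)
def pvAStep (st : List Char × Bool × Option Char) (ch : Char) : List Char × Bool × Option Char :=
  let out := st.1
  let escaped := st.2.1
  let ins := st.2.2
  if escaped then
    (if ins = none then out ++ [ch] else out, false, ins)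
  else if ch = '\\' then
    (if ins = none then out ++ [ch] else out, true, ins)
  else if ch = '"' ∨ ch = '\'' then
    match ins with
    | none => (out, false, some ch)
    | some q => if q = ch then (out, false, none) else (out, false, some q)
  else
    (if ins = none then out ++ [ch] else out, false, ins)

def strip_quoted_py (text : String) : String :=
  String.mk (text.toList.foldl pvAStep ([], false, none)).1

-- ===== PORT B =====
-- inner while-loop: skip past the body of a string quoted by q
def pvBSkip (q : Char) : List Char → List Char
  | [] => []
  | c :: rest =>
    if c = '\\' then
      match rest with
      | [] => []
      | _ :: rest' => pvBSkip q rest'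
    else if c = q then rest
    else pvBSkip q rest

-- unfolding equations for pvBSkip (cited by pvBSkip_length, which pvBGo's termination needs)
theorem pvBSkip_bs_nil (q : Char) : pvBSkip q ['\\'] = [] := by rfl
theorem pvBSkip_bs (q d : Char) (l : List Char) : pvBSkip q ('\\' :: d :: l) = pvBSkip q l := by rfl
theorem pvBSkip_close (q : Char) (l : List Char) (hb : ¬ q = '\\') : pvBSkip q (q :: l) = l := by
  rw [pvBSkip.eq_def]; simp [hb]
theorem pvBSkip_other (q c : Char) (l : List Char) (hb : ¬ c = '\\') (hq : ¬ c = q) :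
    pvBSkip q (c :: l) = pvBSkip q l := by
  rw [pvBSkip.eq_def]; simp [hb, hq]

theorem pvBSkip_length (q : Char) (l : List Char) : (pvBSkip q l).length ≤ l.length := by
  have key : ∀ n (l : List Char), l.length ≤ n → (pvBSkip q l).length ≤ l.length := by
    intro n
    induction n with
    | zero =>
      intro l hl
      have : l = [] := List.eq_nil_of_length_eq_zero (Nat.le_zero.mp hl)
      simp [this, pvBSkip]
    | succ n ih =>
      intro l hl
      cases l with
      | nil => simp [pvBSkip]
      | cons c rest =>
        have hr : rest.length ≤ n := by simpa using hl
        by_cases hb : c = '\\'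
        · subst hb
          cases rest with
          | nil => simp [pvBSkip_bs_nil]
          | cons d rest' =>
            have : rest'.length ≤ n := by simp at hr; omega
            have := ih rest' this
            rw [pvBSkip_bs]
            simp at *; omega
        · by_cases hq : c = q
          · subst hq; rw [pvBSkip_close _ _ hb]; simp
          · rw [pvBSkip_other _ _ _ hb hq]
            have := ih rest hr
            simp; omega
  exact key l.length l le_rfl

-- outer while-loop over the remaining characters
def pvBGo : List Char → List Char
  | [] => []
  | c :: rest =>
    if c = '\\' then
      match rest with
      | [] => [c]
      | d :: rest' => c :: d :: pvBGo rest'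
    else if c = '"' ∨ c = '\'' then
      pvBGo (pvBSkip c rest)
    else
      c :: pvBGo rest
termination_by l => l.length
decreasing_by
  all_goals simp
  all_goals first
    | omega
    | exact pvBSkip_length _ _

def strip_quoted_py_alt (text : String) : String :=
  String.mk (pvBGo text.toList)

-- ===== PRECONDITION & SPEC =====
def Spec_strip_quoted_py (text : String) (out : String) : Prop := out = strip_quoted_py_alt text
instance (text : String) (out : String) : Decidable (Spec_strip_quoted_py text out) := by unfold Spec_strip_quoted_py; infer_instance

-- ===== CLAIM (what is proved, stated in full; the proofs are below) =====
def Claim_equal_strip_quoted_py : Prop := ∀ (text : String), Dom_strip_quoted_py text → Spec_strip_quoted_py text (strip_quoted_py text)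

-- ===== LEMMAS AND PROOFS =====

-- unfolding equations for pvBGo
theorem pvBGo_nil : pvBGo [] = [] := by simp [pvBGo]
theorem pvBGo_bs_nil : pvBGo ['\\'] = ['\\'] := by simp [pvBGo]
theorem pvBGo_bs (d : Char) (l : List Char) : pvBGo ('\\' :: d :: l) = '\\' :: d :: pvBGo l := by
  rw [pvBGo.eq_def]; simp
theorem pvBGo_quote (c : Char) (l : List Char) (hq : c = '"' ∨ c = '\'') :
    pvBGo (c :: l) = pvBGo (pvBSkip c l) := by
  have hb : ¬ c = '\\' := by rcases hq with h | h <;> simp [h]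
  rw [pvBGo.eq_def]; simp [hb, hq]
theorem pvBGo_other (c : Char) (l : List Char) (hb : ¬ c = '\\') (hq : ¬ (c = '"' ∨ c = '\'')) :
    pvBGo (c :: l) = c :: pvBGo l := by
  rw [pvBGo.eq_def]; simp [hb, hq]

-- the suffix A's loop appends from state (escaped, in_string) on the remaining input
def pvAOut (escaped : Bool) (ins : Option Char) : List Char → List Char
  | [] => []
  | c :: l =>
    if escaped then
      (if ins = none then [c] else []) ++ pvAOut false ins l
    else if c = '\\' then
      (if ins = none then [c] else []) ++ pvAOut true ins l
    else if c = '"' ∨ c = '\'' then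
      match ins with
      | none => pvAOut false (some c) l
      | some q => if q = c then pvAOut false none l else pvAOut false (some q) l
    else
      (if ins = none then [c] else []) ++ pvAOut false ins l

theorem pvFoldl_eq_pvAOut (l : List Char) : ∀ (out : List Char) (e : Bool) (i : Option Char),
    (l.foldl pvAStep (out, e, i)).1 = out ++ pvAOut e i l := by
  induction l with
  | nil => intro out e i; simp [pvAOut]
  | cons c l ih =>
    intro out e i
    simp only [List.foldl_cons]
    by_cases he : e = true
    · subst he
      cases i <;> simp [pvAStep, pvAOut, ih]
    · simp only [Bool.not_eq_true] at he; subst he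
      by_cases hb : c = '\\'
      · subst hb; cases i <;> simp [pvAStep, pvAOut, ih]
      · by_cases hq : c = '"' ∨ c = '\''
        · cases i with
          | none => simp [pvAStep, pvAOut, hb, hq, ih]
          | some q =>
            by_cases hqc : q = c <;>
              simp [pvAStep, pvAOut, hb, hq, hqc, ih]
        · cases i <;> simp [pvAStep, pvAOut, hb, hq, ih]

-- core: A's state machine output equals B's region-skipping output
theorem pvAOut_eq_pvBGo : ∀ (n : ℕ) (l : List Char), l.length ≤ n →
    pvAOut false none l = pvBGo l ∧
    (∀ q, (q = '"' ∨ q = '\'') → pvAOut false (some q) l = pvBGo (pvBSkip q l)) := by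
  intro n
  induction n with
  | zero =>
    intro l hl
    have : l = [] := List.eq_nil_of_length_eq_zero (Nat.le_zero.mp hl)
    subst this
    exact ⟨by simp [pvAOut, pvBGo_nil], fun q _ => by simp [pvAOut, pvBSkip, pvBGo_nil]⟩
  | succ n ih =>
    intro l hl
    cases l with
    | nil => exact ⟨by simp [pvAOut, pvBGo_nil], fun q _ => by simp [pvAOut, pvBSkip, pvBGo_nil]⟩
    | cons c l =>
      have hl' : l.length ≤ n := by simpa using hl
      constructor
      · -- outside any string
        by_cases hb : c = '\\'
        · subst hb
          cases l with
          | nil => simp [pvAOut, pvBGo_bs_nil]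
          | cons d l' =>
            have : l'.length ≤ n := by simp at hl'; omega
            simp [pvAOut, pvBGo_bs, (ih l' this).1]
        · by_cases hq : c = '"' ∨ c = '\''
          · rw [pvBGo_quote c l hq]
            simp [pvAOut, hb, hq, (ih l hl').2 c hq]
          · rw [pvBGo_other c l hb hq]
            simp [pvAOut, hb, hq, (ih l hl').1]
      · -- inside a string quoted by q
        intro q hqq
        by_cases hb : c = '\\'
        · subst hb
          cases l with
          | nil => simp [pvAOut, pvBSkip_bs_nil, pvBGo_nil]
          | cons d l' =>
            have hl'' : l'.length ≤ n := by simp at hl'; omega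
            rw [pvBSkip_bs]
            simp [pvAOut, (ih l' hl'').2 q hqq]
        · have hbq : ¬ q = '\\' := by rcases hqq with h | h <;> simp [h]
          by_cases hq : c = '"' ∨ c = '\''
          · by_cases hqc : q = c
            · subst hqc
              rw [pvBSkip_close q l hbq]
              simp [pvAOut, hb, hq, (ih l hl').1]
            · have hcq : ¬ c = q := fun h => hqc h.symm
              rw [pvBSkip_other q c l hb hcq]
              simp [pvAOut, hb, hq, hqc, (ih l hl').2 q hqq]
          · have hcq : ¬ c = q := fun h => hq (h ▸ hqq)
            rw [pvBSkip_other q c l hb hcq]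
            simp [pvAOut, hb, hq, (ih l hl').2 q hqq]

-- ===== VERDICT (by name: the statement is the Claim_ definition above) =====
theorem strip_quoted_py_spec : Claim_equal_strip_quoted_py := by
  intro text _
  unfold Spec_strip_quoted_py strip_quoted_py strip_quoted_py_alt
  rw [pvFoldl_eq_pvAOut, (pvAOut_eq_pvBGo text.toList.length text.toList le_rfl).1]
  simp
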